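-- pv_equiv track=rewrite | github.com/pypi-data/pypi-mirror-370 | packages/dokanalyse/dokanalyse-0.0.13.tar.gz/dokanalyse-0.0.13/src/dokanalyse/services/quality/coverage_quality.py | _has_coverage
-- ===== SOURCE A (Python) =====
-- from typing import List, Dict, Tuple
--
-- def _has_coverage(values: List[str], warning_threshold: str) -> bool:
--     if len(values) == 0 and warning_threshold is None:
--         return False
--
--     has_value = any(value in ['ikkeKartlagt', 'Ikke kartlagt',
--                     'ikkeRelevant', 'Ikke relevant'] for value in values)
--
--     if has_value:
--         has_other_values = any(
--             value not in ['ikkeKartlagt', 'Ikke kartlagt', 'ikkeRelevant', 'Ikke relevant'] for value in values)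
--         return has_other_values
--
--     return True
-- ===== SOURCE B (Python) =====
-- _PLACEHOLDERS = ('ikkeKartlagt', 'Ikke kartlagt', 'ikkeRelevant', 'Ikke relevant')
--
-- def _has_coverage(values, warning_threshold):
--     # Coverage is absent exactly when a nonempty list consists entirely of
--     # placeholders, or the list is empty with no threshold configured.
--     if not values:
--         return warning_threshold is not None
--     return sum(v in _PLACEHOLDERS for v in values) != len(values)
-- ===== Notes on version B (the rewrite author's own statement) =====
-- stated objective: simpler
-- what changed: Replaces A's two existence scans (any placeholder / any non-placeholder) with a single count of placeholder values compared arithmetically to the list length ('not all placeholders'), and folds the empty-list guard into 'warning_threshold is not None'.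
import Mathlib
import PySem

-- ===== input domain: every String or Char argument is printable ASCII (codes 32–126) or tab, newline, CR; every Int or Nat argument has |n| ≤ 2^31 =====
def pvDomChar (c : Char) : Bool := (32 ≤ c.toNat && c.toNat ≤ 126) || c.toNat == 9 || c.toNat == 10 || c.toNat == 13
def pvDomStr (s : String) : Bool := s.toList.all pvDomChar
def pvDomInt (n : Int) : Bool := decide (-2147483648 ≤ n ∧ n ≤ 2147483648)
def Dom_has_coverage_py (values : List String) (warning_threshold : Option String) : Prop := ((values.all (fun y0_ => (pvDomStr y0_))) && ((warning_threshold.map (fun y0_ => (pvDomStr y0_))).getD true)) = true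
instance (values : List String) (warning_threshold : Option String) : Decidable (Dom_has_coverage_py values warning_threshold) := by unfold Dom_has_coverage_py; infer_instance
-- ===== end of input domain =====

-- B replaces A's two existence scans with one count of placeholder values compared to the length ("not all placeholders"); same results, plainer.


-- ===== PORT A =====
-- The placeholder list from A / tuple from B (same four strings).
def pvPlaceholders : List String := ["ikkeKartlagt", "Ikke kartlagt", "ikkeRelevant", "Ikke relevant"]

def has_coverage_py (values : List String) (warning_threshold : Option String) : Bool :=
  if values.length = 0 ∧ warning_threshold = none then
    false
  else
    -- has_value = any(value in [...] for value in values)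
    let has_value := values.any (fun value => pvPlaceholders.contains value)
    if has_value then
      -- has_other_values = any(value not in [...] for value in values)
      let has_other_values := values.any (fun value => ! pvPlaceholders.contains value)
      has_other_values
    else
      true

-- ===== PORT B =====
-- B: empty case answered by the threshold; otherwise count placeholders and compare to the length.
def has_coverage_py_alt (values : List String) (warning_threshold : Option String) : Bool :=
  if values = [] then
    warning_threshold.isSome
  else
    -- sum(v in _PLACEHOLDERS for v in values) != len(values)
    decide (values.countP (fun v => pvPlaceholders.contains v) ≠ values.length)

-- ===== PRECONDITION & SPEC =====
def Spec_has_coverage_py (values : List String) (warning_threshold : Option String) (out : Bool) : Prop := out = has_coverage_py_alt values warning_threshold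
instance (values : List String) (warning_threshold : Option String) (out : Bool) : Decidable (Spec_has_coverage_py values warning_threshold out) := by unfold Spec_has_coverage_py; infer_instance

-- ===== CLAIM (what is proved, stated in full; the proofs are below) =====
def Claim_equal_has_coverage_py : Prop := ∀ (values : List String) (warning_threshold : Option String), Dom_has_coverage_py values warning_threshold → Spec_has_coverage_py values warning_threshold (has_coverage_py values warning_threshold)

-- ===== LEMMAS AND PROOFS =====

-- ===== VERDICT (by name: the statement is the Claim_ definition above) =====
theorem has_coverage_py_spec : Claim_equal_has_coverage_py := by
  intro values warning_threshold _
  unfold Spec_has_coverage_py has_coverage_py has_coverage_py_alt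
  by_cases hv : values = []
  · subst hv
    cases warning_threshold <;> simp
  · rw [if_neg (fun h => hv (List.length_eq_zero_iff.mp h.1)), if_neg hv]
    by_cases hall : ∀ v ∈ values, pvPlaceholders.contains v = true
    · -- all placeholders: A's first any is true, the second false; B's count = length
      have hcnt : values.countP (fun v => pvPlaceholders.contains v) = values.length :=
        List.countP_eq_length.mpr hall
      have hne : values ≠ [] := hv
      obtain ⟨x, xs, rfl⟩ := List.exists_cons_of_ne_nil hne
      simp only [List.any_cons, hall x List.mem_cons_self, Bool.true_or, if_true, hcnt]
      simp only [ne_eq, not_true_eq_false, decide_false, Bool.not_true, Bool.false_or]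
      rw [List.any_eq_false]
      intro v hvmem
      simpa using hall v (List.mem_cons_of_mem x hvmem)
    · -- some non-placeholder exists: both sides are true
      push_neg at hall
      obtain ⟨w, hw, hwp⟩ := hall
      have hB : values.countP (fun v => pvPlaceholders.contains v) ≠ values.length := by
        intro h
        exact hwp (List.countP_eq_length.mp h w hw)
      rw [decide_eq_true hB]
      by_cases hany : values.any (fun value => pvPlaceholders.contains value) = true
      · rw [if_pos hany]
        rw [List.any_eq_true]
        refine ⟨w, hw, ?_⟩
        simpa using fun hm => hwp (by simpa using hm)
      · rw [if_neg hany]
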